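-- pv_equiv track=rewrite | github.com/John321Blacksmith/logic | great_parser.py | inspect_slashes
-- ===== SOURCE A (Python) =====
-- def inspect_slashes(seq: str):
-- 	"""this function iterates through the string
-- 		 and finds the third forward slash inside one and
-- 		 returns its index."""
-- 	count = 0
-- 	for i in range(0, len(seq)):
-- 		if seq[i] == '/':
-- 			count += 1
-- 			if count == 3:
-- 				return i
-- 			else:
-- 				continue
-- ===== SOURCE B (Python) =====
-- def inspect_slashes(seq: str):
--     idxs = [i for i, c in enumerate(seq) if c == '/']
--     if len(idxs) >= 3:
--         return idxs[2]
-- ===== Notes on version B (the rewrite author's own statement) =====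
-- stated objective: simpler
-- what changed: Replaces the early-exit counting loop with a position table: one comprehension collects all slash indices, then the third is looked up by index behind a length guard that reproduces the fall-through when there are fewer than three slashes.
import Mathlib
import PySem

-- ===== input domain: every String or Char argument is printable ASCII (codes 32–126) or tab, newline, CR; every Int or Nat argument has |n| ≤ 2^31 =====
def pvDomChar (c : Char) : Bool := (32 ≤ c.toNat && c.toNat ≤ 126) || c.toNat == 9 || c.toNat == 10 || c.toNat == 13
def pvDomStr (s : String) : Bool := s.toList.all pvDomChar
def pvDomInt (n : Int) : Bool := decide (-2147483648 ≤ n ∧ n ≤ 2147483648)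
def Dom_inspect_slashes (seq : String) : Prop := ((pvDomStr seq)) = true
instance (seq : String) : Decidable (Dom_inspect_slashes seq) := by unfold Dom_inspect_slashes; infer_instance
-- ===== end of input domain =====

-- B replaces A's early-exit counting loop by a table of all '/' positions indexed at 2 (objective: simpler).

-- ===== PORT A =====
-- the for-loop over range(0, len(seq)) with the running count, returning early at count == 3
def inspectGoA : List Char → Int → Int → Option Int
  | [], _, _ => none
  | c :: rest, i, count =>
    if c = '/' then
      if count + 1 = 3 then some i
      else inspectGoA rest (i + 1) (count + 1)
    else inspectGoA rest (i + 1) count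

def inspect_slashes (seq : String) : Option Int :=
  inspectGoA seq.toList 0 0

-- ===== PORT B =====
def inspect_slashes_alt (seq : String) : Option Int :=
  let idxs : List Int :=
    (PySem.List.enumerate seq.toList).filterMap
      (fun p => if p.2 = '/' then some p.1 else none)
  if 3 ≤ idxs.length then idxs[2]? else none

-- ===== PRECONDITION & SPEC =====
def Spec_inspect_slashes (seq : String) (out : Option Int) : Prop := out = inspect_slashes_alt seq
instance (seq : String) (out : Option Int) : Decidable (Spec_inspect_slashes seq out) := by unfold Spec_inspect_slashes; infer_instance

-- ===== CLAIM (what is proved, stated in full; the proofs are below) =====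
def Claim_equal_inspect_slashes : Prop := ∀ (seq : String), Dom_inspect_slashes seq → Spec_inspect_slashes seq (inspect_slashes seq)

-- ===== LEMMAS AND PROOFS =====

-- A's loop with running count k (0 ≤ k ≤ 2) returns the (2-k)-th collected slash index.
theorem inspectGoA_eq (cs : List Char) : ∀ (i k : Int), 0 ≤ k → k ≤ 2 →
    inspectGoA cs i k =
      ((PySem.List.enumerate cs i).filterMap
        (fun p => if p.2 = '/' then some p.1 else none))[(2 - k).toNat]? := by
  induction cs with
  | nil => intro i k _ _; simp [inspectGoA, PySem.List.enumerate_nil]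
  | cons c rest ih =>
    intro i k hk0 hk2
    rw [PySem.List.enumerate_cons]
    by_cases hc : c = '/'
    · by_cases h3 : k + 1 = 3
      · have : (2 - k).toNat = 0 := by omega
        simp [inspectGoA, hc, h3, this]
      · have h1 : inspectGoA (c :: rest) i k = inspectGoA rest (i + 1) (k + 1) := by
          simp [inspectGoA, hc, h3]
        rw [h1, ih (i + 1) (k + 1) (by omega) (by omega)]
        have : (2 - k).toNat = (2 - (k + 1)).toNat + 1 := by omega
        simp [hc, this]
    · have h1 : inspectGoA (c :: rest) i k = inspectGoA rest (i + 1) k := by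
        simp [inspectGoA, hc]
      rw [h1, ih (i + 1) k hk0 hk2]
      simp [hc]

-- ===== VERDICT (by name: the statement is the Claim_ definition above) =====
theorem inspect_slashes_spec : Claim_equal_inspect_slashes := by
  intro seq _
  unfold Spec_inspect_slashes inspect_slashes inspect_slashes_alt
  rw [inspectGoA_eq seq.toList 0 0 (by omega) (by omega)]
  set l := (PySem.List.enumerate seq.toList).filterMap
      (fun p => if p.2 = '/' then some p.1 else none)
  by_cases h : 3 ≤ l.length
  · simp [h]
  · simp [h, List.getElem?_eq_none (by omega : l.length ≤ 2)]
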